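-- pv_equiv track=rewrite | github.com/ribecks98/NCAA | listParse.py | chopForwards
-- ===== SOURCE A (Python) =====
-- def chopForwards(lines,string):
--     i = 0
--     count = len(lines)
--     flag = 0
--     cut = []
--     while i < count:
--         if flag:
--             cut.append(lines.pop(i))
--             count = count - 1
--         elif string in lines[i]:
--             flag = 1
--             i = i + 1
--         else:
--             i = i + 1
--     return cut
-- ===== SOURCE B (Python) =====
-- def chopForwards(lines, string):
--     # Single scan: find the first line containing `string`; everything after it
--     # is the cut.  Like A, this removes the cut tail from `lines` in place.
--     for i, line in enumerate(lines):
--         if string in line: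
--             cut = lines[i+1:]
--             del lines[i+1:]
--             return cut
--     return []
-- ===== Notes on version B (the rewrite author's own statement) =====
-- stated objective: simpler
-- what changed: Replaces the stateful while-loop (flag, shrinking count, repeated lines.pop(i)) with a single scan for the first matching line followed by one slice/del of the tail; avoids A's O(n) list shift per popped element, though a timing run measured only ~1.4x.
import Mathlib
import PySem

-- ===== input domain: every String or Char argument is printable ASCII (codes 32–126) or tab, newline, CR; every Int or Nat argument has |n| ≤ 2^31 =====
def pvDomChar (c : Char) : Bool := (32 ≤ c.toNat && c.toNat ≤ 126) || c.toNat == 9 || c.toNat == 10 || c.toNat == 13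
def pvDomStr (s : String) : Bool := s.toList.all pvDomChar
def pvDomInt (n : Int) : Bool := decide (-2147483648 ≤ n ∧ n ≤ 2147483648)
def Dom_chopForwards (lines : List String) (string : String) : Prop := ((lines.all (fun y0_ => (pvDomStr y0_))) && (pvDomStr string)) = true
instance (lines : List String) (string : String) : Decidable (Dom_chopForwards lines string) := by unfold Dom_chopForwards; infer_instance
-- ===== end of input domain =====

-- B finds the first matching line in one scan and returns the tail in one slice, instead of A's
-- stateful flag/count loop with repeated pop(i); equivalence is about the return value — both
-- Pythons also truncate `lines` in place to the prefix ending at the first matching line.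

-- ===== PORT A =====
-- while i < count: if flag: cut.append(lines.pop(i)); count -= 1; elif string in lines[i]: flag=1; i+=1; else: i+=1
def chopForwardsLoop (lines : List String) (string : String) (i count : Nat) (flag : Bool) (cut : List String) : List String :=
  if i < count then
    if flag then
      match PySem.List.pop? lines (i : Int) with
      | some (x, rest) => chopForwardsLoop rest string i (count - 1) flag (cut ++ [x])
      | none => cut  -- unreachable when count = lines.length (Python would raise IndexError)
    else if PySem.Str.isIn string (PySem.List.pyGetD lines (i : Int) "") then
      chopForwardsLoop lines string (i + 1) count true cut
    else
      chopForwardsLoop lines string (i + 1) count false cut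
  else cut
termination_by count - i
decreasing_by all_goals omega

def chopForwards (lines : List String) (string : String) : List String :=
  chopForwardsLoop lines string 0 lines.length false []

-- ===== PORT B =====
-- for i, line in enumerate(lines): if string in line: return lines[i+1:]   (else [])
def chopCut (lines : List String) (string : String) : List String :=
  match lines with
  | [] => []
  | l :: rest => if PySem.Str.isIn string l then rest else chopCut rest string

def chopForwards_alt (lines : List String) (string : String) : List String :=
  chopCut lines string

-- ===== PRECONDITION & SPEC =====
def Spec_chopForwards (lines : List String) (string : String) (out : List String) : Prop := out = chopForwards_alt lines string
instance (lines : List String) (string : String) (out : List String) : Decidable (Spec_chopForwards lines string out) := by unfold Spec_chopForwards; infer_instance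

-- ===== CLAIM (what is proved, stated in full; the proofs are below) =====
def Claim_equal_chopForwards : Prop := ∀ (lines : List String) (string : String), Dom_chopForwards lines string → Spec_chopForwards lines string (chopForwards lines string)

-- ===== LEMMAS AND PROOFS =====

-- Flag phase: once flag is set at position i, the loop drains lines[i:] into cut.
theorem chopLoop_flag (string : String) : ∀ (n : Nat) (lines cut : List String) (i : Nat),
    lines.length - i ≤ n → i ≤ lines.length →
    chopForwardsLoop lines string i lines.length true cut = cut ++ lines.drop i := by
  intro n
  induction n with
  | zero =>
    intro lines cut i hn hi
    have : i = lines.length := by omega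
    subst this
    rw [chopForwardsLoop]
    simp
  | succ n ih =>
    intro lines cut i hn hi
    rw [chopForwardsLoop]
    by_cases h : i < lines.length
    · rw [if_pos h, if_pos rfl, PySem.List.pop?_natCast lines i h]
      dsimp only
      have hlen : (lines.eraseIdx i).length = lines.length - 1 :=
        List.length_eraseIdx_of_lt h
      have hrec := ih (lines.eraseIdx i) (cut ++ [lines[i]]) i (by rw [hlen]; omega) (by rw [hlen]; omega)
      rw [hlen] at hrec
      rw [hrec]
      have hdrop : (lines.eraseIdx i).drop i = lines.drop (i + 1) := by
        rw [List.eraseIdx_eq_take_drop_succ, List.drop_append]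
        have h1 : (lines.take i).length = i := List.length_take_of_le (by omega)
        simp [h1]
      rw [hdrop, List.append_assoc]
      congr 1
      have := List.getElem_cons_drop (as := lines) (i := i) h
      exact this.symm ▸ rfl
    · rw [if_neg h, List.drop_eq_nil_of_le (by omega)]
      simp

-- Scan phase: while flag is 0 the loop walks the list exactly as chopCut does.
theorem chopLoop_scan (string : String) : ∀ (n : Nat) (lines : List String) (i : Nat),
    lines.length - i ≤ n → i ≤ lines.length →
    chopForwardsLoop lines string i lines.length false [] = chopCut (lines.drop i) string := by
  intro n
  induction n with
  | zero =>
    intro lines i hn hi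
    have : i = lines.length := by omega
    subst this
    rw [chopForwardsLoop]
    simp [chopCut]
  | succ n ih =>
    intro lines i hn hi
    rw [chopForwardsLoop]
    by_cases h : i < lines.length
    · simp only [if_pos h, if_neg (by simp : ¬ (false = true))]
      have hget : PySem.List.pyGetD lines (i : Int) "" = lines[i] := by
        rw [PySem.List.pyGetD_natCast]
        exact List.getD_eq_getElem lines "" h
      have hdrop : lines.drop i = lines[i] :: lines.drop (i + 1) := by
        have := List.getElem_cons_drop (as := lines) (i := i) h
        exact this.symm ▸ rfl
      rw [hget, hdrop]
      simp only [chopCut]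
      by_cases hin : PySem.Str.isIn string lines[i]
      · rw [if_pos hin, if_pos hin]
        exact chopLoop_flag string lines.length lines [] (i + 1) (by omega) (by omega)
      · rw [if_neg hin, if_neg hin]
        exact ih lines (i + 1) (by omega) (by omega)
    · rw [if_neg h, List.drop_eq_nil_of_le (by omega)]
      simp [chopCut]

-- ===== VERDICT (by name: the statement is the Claim_ definition above) =====
theorem chopForwards_spec : Claim_equal_chopForwards := by
  intro lines string _
  unfold Spec_chopForwards chopForwards chopForwards_alt
  rw [chopLoop_scan string lines.length lines 0 (by omega) (by omega)]
  simp
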